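-- pv_equiv track=rewrite | github.com/samuellozanoiglesias/LearnLikeMe | generate_stimuli_test_pairs.py | has_carry
-- ===== SOURCE A (Python) =====
-- def has_carry(a: int, b: int, number_size: int):
--     """Return a list of booleans indicating if there is a carry at each digit position (except the last)."""
--     carries = []
--     carry = 0
--     for i in range(number_size):
--         digit_a = (a // (10 ** i)) % 10
--         digit_b = (b // (10 ** i)) % 10
--         s = digit_a + digit_b + carry
--         if i < number_size - 1:
--             carries.append(s >= 10)
--         carry = s // 10
--     return carries  # carries[0]=units->tens, carries[1]=tens->hundreds, ...
-- ===== SOURCE B (Python) =====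
-- def has_carry(a: int, b: int, number_size: int):
--     """Return a list of booleans indicating if there is a carry at each digit position (except the last)."""
--     carries = []
--     for i in range(number_size - 1):
--         m = 10 ** (i + 1)
--         carries.append(a % m + b % m >= m)
--     return carries
-- ===== Notes on version B (the rewrite author's own statement) =====
-- stated objective: alternative
-- what changed: B drops A's sequential carry state entirely and computes each position independently via the block-sum identity: carry out of position i holds iff a % 10**(i+1) + b % 10**(i+1) >= 10**(i+1), looping over range(number_size - 1) with no digit extraction and no running carry.
import Mathlib
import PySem

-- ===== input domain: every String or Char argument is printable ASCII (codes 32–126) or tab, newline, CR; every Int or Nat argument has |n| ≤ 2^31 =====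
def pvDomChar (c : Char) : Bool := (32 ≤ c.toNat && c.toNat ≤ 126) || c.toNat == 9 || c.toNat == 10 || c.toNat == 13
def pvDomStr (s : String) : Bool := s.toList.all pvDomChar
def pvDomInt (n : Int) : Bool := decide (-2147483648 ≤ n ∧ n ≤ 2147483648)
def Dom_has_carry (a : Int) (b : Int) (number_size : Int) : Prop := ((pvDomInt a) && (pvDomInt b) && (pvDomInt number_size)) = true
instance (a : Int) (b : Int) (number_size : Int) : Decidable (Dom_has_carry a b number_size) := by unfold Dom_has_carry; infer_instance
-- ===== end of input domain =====

-- B replaces A's sequential carry propagation by an independent per-position block-sum test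
-- (carry out of position i  ⟺  a % 10^(i+1) + b % 10^(i+1) ≥ 10^(i+1)); objective: alternative.

-- ===== PORT A =====
-- step of A's for-loop: state = (carries, carry); i comes from range(number_size), so i ≥ 0
-- and `10 ** i` is ported as `10 ^ i.toNat` (exact for the i the loop produces).
def hcStep (number_size : Int) (a : Int) (b : Int) (st : List Bool × Int) (i : Int) :
    List Bool × Int :=
  let digit_a := PySem.Int.mod (PySem.Int.floordiv a (10 ^ i.toNat)) 10
  let digit_b := PySem.Int.mod (PySem.Int.floordiv b (10 ^ i.toNat)) 10
  let s := digit_a + digit_b + st.2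
  let carries := if i < number_size - 1 then st.1 ++ [decide (s ≥ 10)] else st.1
  (carries, PySem.Int.floordiv s 10)

def has_carry (a : Int) (b : Int) (number_size : Int) : List Bool :=
  ((PySem.List.pyRange 0 number_size 1).foldl (hcStep number_size a b) ([], 0)).1

-- ===== PORT B =====
-- B's loop: for i in range(number_size - 1): m = 10**(i+1); append(a % m + b % m >= m)
def has_carry_alt (a : Int) (b : Int) (number_size : Int) : List Bool :=
  (PySem.List.pyRange 0 (number_size - 1) 1).foldl
    (fun carries i =>
      let m : Int := 10 ^ (i.toNat + 1)
      carries ++ [decide (PySem.Int.mod a m + PySem.Int.mod b m ≥ m)])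
    []

-- ===== PRECONDITION & SPEC =====
def Spec_has_carry (a : Int) (b : Int) (number_size : Int) (out : List Bool) : Prop := out = has_carry_alt a b number_size
instance (a : Int) (b : Int) (number_size : Int) (out : List Bool) : Decidable (Spec_has_carry a b number_size out) := by unfold Spec_has_carry; infer_instance

-- ===== CLAIM (what is proved, stated in full; the proofs are below) =====
def Claim_equal_has_carry : Prop := ∀ (a : Int) (b : Int) (number_size : Int), Dom_has_carry a b number_size → Spec_has_carry a b number_size (has_carry a b number_size)

-- ===== LEMMAS AND PROOFS =====

-- block sum of the low j digits and its carry into position j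
def blockS (a b : Int) (j : Nat) : Int := a % 10 ^ j + b % 10 ^ j
def blockC (a b : Int) (j : Nat) : Int := blockS a b j / 10 ^ j

lemma pow10_pos (j : Nat) : (0 : Int) < 10 ^ j := by positivity

-- a % 10^(j+1) = a % 10^j + 10^j * ((a / 10^j) % 10)
lemma emod_pow_succ (a : Int) (j : Nat) :
    a % 10 ^ (j + 1) = a % 10 ^ j + 10 ^ j * (a / 10 ^ j % 10) := by
  have hP := pow10_pos j
  have h1 := Int.emod_add_mul_ediv a (10 ^ j)
  have h2 := Int.emod_add_mul_ediv (a / 10 ^ j) 10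
  have hr0 : 0 ≤ a / 10 ^ j % 10 := Int.emod_nonneg _ (by norm_num)
  have hr10 : a / 10 ^ j % 10 < 10 := Int.emod_lt_of_pos _ (by norm_num)
  have ha0 : 0 ≤ a % 10 ^ j := Int.emod_nonneg _ hP.ne'
  have haP : a % 10 ^ j < 10 ^ j := Int.emod_lt_of_pos _ hP
  have key : a = (a % 10 ^ j + 10 ^ j * (a / 10 ^ j % 10)) + 10 ^ (j + 1) * (a / 10 ^ j / 10) := by
    rw [pow_succ]; nlinarith [h1, h2]
  have hlt : a % 10 ^ j + 10 ^ j * (a / 10 ^ j % 10) < 10 ^ (j + 1) := by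
    rw [pow_succ]; nlinarith
  have hge : 0 ≤ a % 10 ^ j + 10 ^ j * (a / 10 ^ j % 10) := by positivity
  conv_lhs => rw [key]
  rw [Int.add_mul_emod_self_left, Int.emod_eq_of_lt hge hlt]

lemma blockS_succ (a b : Int) (j : Nat) :
    blockS a b (j + 1) =
      10 ^ j * (a / 10 ^ j % 10 + b / 10 ^ j % 10 + blockC a b j) + blockS a b j % 10 ^ j := by
  have hc := Int.emod_add_mul_ediv (a % 10 ^ j + b % 10 ^ j) (10 ^ j)
  simp only [blockS, blockC, emod_pow_succ]
  linarith [hc]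

lemma blockC_succ (a b : Int) (j : Nat) :
    blockC a b (j + 1) = (a / 10 ^ j % 10 + b / 10 ^ j % 10 + blockC a b j) / 10 := by
  have hP := pow10_pos j
  have hr0 : 0 ≤ blockS a b j % 10 ^ j := Int.emod_nonneg _ hP.ne'
  have hrP : blockS a b j % 10 ^ j < 10 ^ j := Int.emod_lt_of_pos _ hP
  set s := a / 10 ^ j % 10 + b / 10 ^ j % 10 + blockC a b j with hs
  have : blockC a b (j + 1) = (10 ^ j * s + blockS a b j % 10 ^ j) / 10 ^ (j + 1) := by
    rw [blockC, blockS_succ]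
  rw [this, pow_succ, ← Int.ediv_ediv_of_nonneg hP.le]
  congr 1
  rw [add_comm, Int.add_mul_ediv_left _ _ hP.ne', Int.ediv_eq_zero_of_lt hr0 hrP, zero_add]

lemma carry_out_iff (a b : Int) (j : Nat) :
    (10 ≤ a / 10 ^ j % 10 + b / 10 ^ j % 10 + blockC a b j) ↔
      (10 ^ (j + 1) ≤ blockS a b (j + 1)) := by
  have hP := pow10_pos j
  have hr0 : 0 ≤ blockS a b j % 10 ^ j := Int.emod_nonneg _ hP.ne'
  have hrP : blockS a b j % 10 ^ j < 10 ^ j := Int.emod_lt_of_pos _ hP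
  rw [blockS_succ, pow_succ]
  set s := a / 10 ^ j % 10 + b / 10 ^ j % 10 + blockC a b j with hs
  constructor
  · intro h; nlinarith
  · intro h; by_contra hlt; push Not at hlt; nlinarith

-- A's loop from position j with the invariant carry = blockC a b j
lemma loopA_inv (a b ns : Int) (k : Nat) :
    ∀ (j : Nat) (cs : List Bool), (ns - j).toNat = k →
      ((PySem.List.pyRange j ns 1).foldl (hcStep ns a b) (cs, blockC a b j)).1 =
        cs ++ (PySem.List.pyRange j (ns - 1) 1).map
          (fun i => decide ((10 : Int) ^ (i.toNat + 1) ≤ blockS a b (i.toNat + 1))) := by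
  induction k with
  | zero =>
    intro j cs hk
    have hle : ns ≤ (j : Int) := by omega
    rw [PySem.List.pyRange_one_eq_nil hle, PySem.List.pyRange_one_eq_nil (by omega)]
    simp
  | succ k ih =>
    intro j cs hk
    have hlt : (j : Int) < ns := by omega
    rw [PySem.List.pyRange_one_cons hlt]
    have hstep : hcStep ns a b (cs, blockC a b j) j =
        ((if (j : Int) < ns - 1 then
            cs ++ [decide ((10:Int) ^ (j + 1) ≤ blockS a b (j + 1))] else cs),
          blockC a b (j + 1)) := by
      simp only [hcStep, Int.toNat_natCast,
        PySem.Int.floordiv_eq_ediv_of_pos (pow10_pos j),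
        PySem.Int.mod_eq_emod_of_pos (show (0:Int) < 10 by norm_num),
        PySem.Int.floordiv_eq_ediv_of_pos (show (0:Int) < 10 by norm_num)]
      rw [Prod.mk.injEq]
      refine ⟨?_, (blockC_succ a b j).symm⟩
      have hd : decide (a / 10 ^ j % 10 + b / 10 ^ j % 10 + blockC a b j ≥ 10)
          = decide ((10:Int) ^ (j + 1) ≤ blockS a b (j + 1)) :=
        decide_eq_decide.mpr (carry_out_iff a b j)
      rw [hd]
    rw [List.foldl_cons, hstep]
    by_cases hj : (j : Int) < ns - 1
    · rw [if_pos hj]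
      have := ih (j + 1) (cs ++ [decide ((10:Int) ^ (j + 1) ≤ blockS a b (j + 1))]) (by omega)
      push_cast at this
      rw [this, PySem.List.pyRange_one_cons hj, List.map_cons, List.append_assoc]
      simp
    · rw [if_neg hj]
      have hns : ns = (j : Int) + 1 := by omega
      have := ih (j + 1) cs (by omega)
      push_cast at this
      rw [this, PySem.List.pyRange_one_eq_nil (by omega),
        PySem.List.pyRange_one_eq_nil (by omega)]

lemma blockC_zero (a b : Int) : blockC a b 0 = 0 := by
  simp [blockC, blockS]

-- ===== VERDICT (by name: the statement is the Claim_ definition above) =====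
theorem has_carry_spec : Claim_equal_has_carry := by
  intro a b ns _
  unfold Spec_has_carry has_carry has_carry_alt
  rw [PySem.List.foldl_append_singleton_eq_map, List.nil_append]
  by_cases hns : ns ≤ 0
  · rw [PySem.List.pyRange_one_eq_nil (by omega), PySem.List.pyRange_one_eq_nil (by omega)]
    simp
  · push Not at hns
    have h0 : ((0 : Nat) : Int) = 0 := rfl
    have := loopA_inv a b ns (ns - 0).toNat 0 [] rfl
    rw [h0, blockC_zero] at this
    rw [this, List.nil_append]
    apply List.map_congr_left
    intro i hi
    have hi0 : 0 ≤ i := (PySem.List.mem_pyRange_one.mp hi).1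
    have hm : (0:Int) < 10 ^ (i.toNat + 1) := pow10_pos _
    rw [PySem.Int.mod_eq_emod_of_pos hm, PySem.Int.mod_eq_emod_of_pos hm]
    simp [blockS]
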